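-- pv_equiv track=rewrite | github.com/zhongliwu/leetcode | twopointers/_844_back_space_compare.py | emit_backwards
-- ===== SOURCE A (Python) =====
-- def emit_backwards(chars: list[str]) -> int:
--     slow, fast = len(chars) - 1, len(chars) - 1
--     count_backwards = 0
--     while fast >= 0:
--         if chars[fast] == '#':
--             count_backwards += 1
--             fast -= 1
--         elif count_backwards > 0:
--             fast -= 1
--             count_backwards -= 1
--         else:
--             chars[slow] = chars[fast]
--             slow -= 1
--             fast -= 1
--
--     return len(chars) - slow - 1
-- ===== SOURCE B (Python) =====
-- def emit_backwards(chars: list[str]) -> int: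
--     result = []
--     for c in chars:
--         if c == '#':
--             if result:
--                 result.pop()
--         else:
--             result.append(c)
--     # reproduce A's in-place packing of the resolved chars into the tail
--     chars[len(chars) - len(result):] = result
--     return len(result)
-- ===== Notes on version B (the rewrite author's own statement) =====
-- stated objective: idiomatic
-- what changed: Replaces the backward two-pointer scan with a skip counter by a forward pass maintaining an explicit stack of resolved characters (A's in-place tail packing reproduced by a single splice).
import Mathlib
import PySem

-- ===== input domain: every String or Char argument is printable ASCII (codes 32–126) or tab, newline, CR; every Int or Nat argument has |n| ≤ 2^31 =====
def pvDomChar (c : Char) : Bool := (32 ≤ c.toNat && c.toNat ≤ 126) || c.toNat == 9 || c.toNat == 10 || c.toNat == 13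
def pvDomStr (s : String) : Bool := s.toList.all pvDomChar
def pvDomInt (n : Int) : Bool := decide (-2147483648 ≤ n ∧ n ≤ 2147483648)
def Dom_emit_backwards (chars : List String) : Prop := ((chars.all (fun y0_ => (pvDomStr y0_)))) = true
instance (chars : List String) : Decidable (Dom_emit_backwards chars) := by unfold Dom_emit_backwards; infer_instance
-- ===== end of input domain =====

-- B replaces the backward skip-counter scan by a forward explicit stack; both mutate chars
-- the same way in Python (tail packing) — the equivalence proved here is about the RETURN value.

-- ===== PORT A =====
-- the while loop over fast = n-1 down to -1; fast+1 is the Nat recursion index.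
-- chars[fast] is always in range (fast starts at len-1 and only decreases), so List.getD is exact.
def emit_backwards_loop (chars : List String) : Nat → Int → Int → Int
  | 0, slow, _ => slow
  | n+1, slow, count =>
    if chars.getD n "" == "#" then emit_backwards_loop chars n slow (count + 1)
    else if count > 0 then emit_backwards_loop chars n slow (count - 1)
    else emit_backwards_loop chars n (slow - 1) count

def emit_backwards (chars : List String) : Int :=
  (chars.length : Int) - emit_backwards_loop chars chars.length ((chars.length : Int) - 1) 0 - 1

-- ===== PORT B =====
def emit_backwards_alt_step (st : List String) (c : String) : List String :=
  if c == "#" then (if st ≠ [] then st.dropLast else st) else st ++ [c]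

def emit_backwards_alt (chars : List String) : Int :=
  ((chars.foldl emit_backwards_alt_step []).length : Int)

-- ===== PRECONDITION & SPEC =====
def Spec_emit_backwards (chars : List String) (out : Int) : Prop := out = emit_backwards_alt chars
instance (chars : List String) (out : Int) : Decidable (Spec_emit_backwards chars out) := by unfold Spec_emit_backwards; infer_instance

-- ===== CLAIM (what is proved, stated in full; the proofs are below) =====
def Claim_equal_emit_backwards : Prop := ∀ (chars : List String), Dom_emit_backwards chars → Spec_emit_backwards chars (emit_backwards chars)

-- ===== LEMMAS AND PROOFS =====

-- spec function: number of characters emitted when scanning a (reversed) suffix with pending skip count c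
def pvK : List String → Int → Int
  | [], _ => 0
  | x :: r, c =>
    if x == "#" then pvK r (c + 1)
    else if c > 0 then pvK r (c - 1)
    else 1 + pvK r 0

theorem pvK_stack (l : List String) (c : Nat) :
    pvK l.reverse (c : Int) =
      ((List.dropLast^[c] (l.foldl emit_backwards_alt_step [])).length : Int) := by
  induction l using List.reverseRecOn generalizing c with
  | nil => simp [pvK, Function.iterate_fixed (f := List.dropLast) (x := ([] : List String)) rfl]
  | append_singleton l x ih =>
    rw [List.reverse_append, List.foldl_append]
    simp only [List.reverse_singleton, List.singleton_append, List.foldl_cons, List.foldl_nil, pvK]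
    by_cases hx : x == "#"
    · simp only [hx]
      have := ih (c + 1)
      push_cast at this ⊢
      rw [this]
      have hstep : emit_backwards_alt_step (l.foldl emit_backwards_alt_step []) x
          = (l.foldl emit_backwards_alt_step []).dropLast := by
        rcases eq_or_ne (l.foldl emit_backwards_alt_step []) [] with h | h
        · simp [emit_backwards_alt_step, hx, h]
        · simp [emit_backwards_alt_step, hx, h]
      rw [hstep, ← Function.iterate_succ_apply]
    · have hstep : emit_backwards_alt_step (l.foldl emit_backwards_alt_step []) x
          = (l.foldl emit_backwards_alt_step []) ++ [x] := by
        simp [emit_backwards_alt_step, hx]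
      rw [if_neg (by simpa using hx), hstep]
      cases c with
      | zero =>
        rw [if_neg (by norm_num)]
        have := ih 0
        simp only [Nat.cast_zero, Function.iterate_zero, id] at this ⊢
        rw [this]; simp; ring
      | succ c' =>
        rw [if_pos (by push_cast; omega)]
        have := ih c'
        push_cast at this ⊢
        rw [show ((c' : Int) + 1 - 1) = (c' : Int) by ring, this,
          Function.iterate_succ_apply]
        simp

theorem loop_eq (chars : List String) (n : Nat) (hn : n ≤ chars.length) (slow : Int) (c : Nat) :
    emit_backwards_loop chars n slow (c : Int) = slow - pvK (chars.take n).reverse (c : Int) := by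
  induction n generalizing slow c with
  | zero => simp [emit_backwards_loop, pvK]
  | succ n ih =>
    have hn' : n < chars.length := hn
    have htake : (chars.take (n+1)).reverse = chars[n] :: (chars.take n).reverse := by
      rw [List.take_add_one, List.getElem?_eq_getElem hn']
      simp
    have hget : chars.getD n "" = chars[n] := by
      simp [List.getD, List.getElem?_eq_getElem hn']
    rw [emit_backwards_loop, htake, pvK, hget]
    by_cases hx : chars[n] == "#"
    · rw [if_pos hx, if_pos hx]
      have := ih (Nat.le_of_succ_le hn) slow (c + 1)
      push_cast at this ⊢
      exact this
    · rw [if_neg hx, if_neg hx]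
      cases c with
      | zero =>
        rw [if_neg (by norm_num), if_neg (by norm_num)]
        have := ih (Nat.le_of_succ_le hn) (slow - 1) 0
        simp only [Nat.cast_zero] at this ⊢
        rw [this]; ring
      | succ c' =>
        rw [if_pos (by push_cast; omega), if_pos (by push_cast; omega)]
        have := ih (Nat.le_of_succ_le hn) slow c'
        push_cast at this ⊢
        rw [show ((c' : Int) + 1 - 1) = (c' : Int) by ring, this]

-- ===== VERDICT (by name: the statement is the Claim_ definition above) =====
theorem emit_backwards_spec : Claim_equal_emit_backwards := by
  intro chars _
  show emit_backwards chars = emit_backwards_alt chars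
  have h := loop_eq chars chars.length le_rfl ((chars.length : Int) - 1) 0
  have hk := pvK_stack chars 0
  simp only [Nat.cast_zero] at h hk
  rw [emit_backwards, h, List.take_length, hk]
  simp [emit_backwards_alt]
  ring
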